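-- pv_equiv track=rewrite | github.com/yoondain/2021-1-Compiler | 1. Lexical/code/lexical.py | checkToken
-- ===== SOURCE A (Python) =====
-- def checkToken(state):
--     if state in [1]:
--         return "Vtype"
--     elif state in [2] or (state in [i for i in range(100,141)] and state not in [102,109,115,119,125,129,134,135,140]):
--         return "ID"
--     elif state in [3,4]:
--         return "Operator"
--     elif state in [5]:
--         return "Semicolon"
--     elif state in [6]:
--         return "Underbar"
--     elif state in [7,22,23]: #discard
--         return "WhiteSpace"
--     elif state in [8]:
--         return "Lparen"
--     elif state in [9]:
--         return "Rparen"
--     elif state in [10]: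
--         return "Lbrace"
--     elif state in [11]:
--         return "Rbrace"
--     elif state in [12]:
--         return "Lbraket"
--     elif state in [13]:
--         return "Rbraket"
--     elif state in [14,19,26,27]:
--         return "Compare"
--     elif state in [15]:
--         return "Assign"
--     elif state in [20]:
--         return "String"
--     elif state in [24]:
--         return "Char"
--     elif state in [25,29]:
--         return "Integer"
--     elif state in [28]:
--         return "KW"
--     elif state in [30]:
--         return "Comma"
--
--     else:
--         return "Error"
-- ===== SOURCE B (Python) =====
-- # Prebuilt lookup table: state -> token name; one dict.get replaces the if/elif chain.
-- def _build_table():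
--     table = {
--         1: "Vtype", 2: "ID",
--         3: "Operator", 4: "Operator",
--         5: "Semicolon", 6: "Underbar",
--         7: "WhiteSpace", 22: "WhiteSpace", 23: "WhiteSpace",
--         8: "Lparen", 9: "Rparen", 10: "Lbrace", 11: "Rbrace",
--         12: "Lbraket", 13: "Rbraket",
--         14: "Compare", 19: "Compare", 26: "Compare", 27: "Compare",
--         15: "Assign", 20: "String", 24: "Char",
--         25: "Integer", 29: "Integer", 28: "KW", 30: "Comma",
--     }
--     skip = [102, 109, 115, 119, 125, 129, 134, 135, 140]
--     for s in range(100, 141):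
--         if s not in skip:
--             table[s] = "ID"
--     return table
--
-- _TABLE = _build_table()
--
-- def checkToken(state):
--     return _TABLE.get(state, "Error")
-- ===== Notes on version B (the rewrite author's own statement) =====
-- stated objective: simpler
-- what changed: Replaced the linear if/elif chain of list-membership tests with a dict built once (explicit entries plus a range(100,141) loop for ID states) and a single table.get(state, 'Error') lookup.
import Mathlib
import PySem

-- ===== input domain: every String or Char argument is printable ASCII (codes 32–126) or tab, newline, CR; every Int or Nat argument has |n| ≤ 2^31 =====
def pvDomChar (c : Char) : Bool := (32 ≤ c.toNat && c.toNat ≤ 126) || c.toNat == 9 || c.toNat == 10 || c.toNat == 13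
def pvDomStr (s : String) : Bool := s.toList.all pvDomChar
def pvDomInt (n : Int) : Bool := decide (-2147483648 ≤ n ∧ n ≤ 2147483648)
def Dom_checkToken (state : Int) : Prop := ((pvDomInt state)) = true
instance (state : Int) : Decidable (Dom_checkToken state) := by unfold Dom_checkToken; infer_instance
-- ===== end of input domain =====

-- B replaces A's if/elif chain by one prebuilt state→token table and a single lookup (objective: simpler).


-- ===== PORT A =====
def checkToken (state : Int) : String :=
  if state ∈ ([1] : List Int) then "Vtype"
  else if state ∈ ([2] : List Int) ∨
      (state ∈ (PySem.List.pyRange 100 141 1).map (fun i => i) ∧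
       state ∉ ([102,109,115,119,125,129,134,135,140] : List Int)) then "ID"
  else if state ∈ ([3,4] : List Int) then "Operator"
  else if state ∈ ([5] : List Int) then "Semicolon"
  else if state ∈ ([6] : List Int) then "Underbar"
  else if state ∈ ([7,22,23] : List Int) then "WhiteSpace"
  else if state ∈ ([8] : List Int) then "Lparen"
  else if state ∈ ([9] : List Int) then "Rparen"
  else if state ∈ ([10] : List Int) then "Lbrace"
  else if state ∈ ([11] : List Int) then "Rbrace"
  else if state ∈ ([12] : List Int) then "Lbraket"
  else if state ∈ ([13] : List Int) then "Rbraket"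
  else if state ∈ ([14,19,26,27] : List Int) then "Compare"
  else if state ∈ ([15] : List Int) then "Assign"
  else if state ∈ ([20] : List Int) then "String"
  else if state ∈ ([24] : List Int) then "Char"
  else if state ∈ ([25,29] : List Int) then "Integer"
  else if state ∈ ([28] : List Int) then "KW"
  else if state ∈ ([30] : List Int) then "Comma"
  else "Error"

-- ===== PORT B =====
def pvBaseTable : PySem.Dict Int String := PySem.Dict.ofList
  [(1,"Vtype"),(2,"ID"),(3,"Operator"),(4,"Operator"),(5,"Semicolon"),(6,"Underbar"),
   (7,"WhiteSpace"),(22,"WhiteSpace"),(23,"WhiteSpace"),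
   (8,"Lparen"),(9,"Rparen"),(10,"Lbrace"),(11,"Rbrace"),(12,"Lbraket"),(13,"Rbraket"),
   (14,"Compare"),(19,"Compare"),(26,"Compare"),(27,"Compare"),
   (15,"Assign"),(20,"String"),(24,"Char"),(25,"Integer"),(29,"Integer"),(28,"KW"),(30,"Comma")]

def pvSkip : List Int := [102,109,115,119,125,129,134,135,140]

def pvTable : PySem.Dict Int String :=
  (PySem.List.pyRange 100 141 1).foldl
    (fun d s => if s ∉ pvSkip then d.insert s "ID" else d) pvBaseTable

def checkToken_alt (state : Int) : String := pvTable.getD state "Error"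

-- ===== PRECONDITION & SPEC =====
def Spec_checkToken (state : Int) (out : String) : Prop := out = checkToken_alt state
instance (state : Int) (out : String) : Decidable (Spec_checkToken state out) := by unfold Spec_checkToken; infer_instance

-- ===== CLAIM (what is proved, stated in full; the proofs are below) =====
def Claim_equal_checkToken : Prop := ∀ (state : Int), Dom_checkToken state → Spec_checkToken state (checkToken state)

-- ===== LEMMAS AND PROOFS =====

set_option maxHeartbeats 1000000 in
lemma checkToken_error_of_out (state : Int) (h : state < 1 ∨ 140 < state) :
    checkToken state = "Error" := by
  have hr : state ∉ (PySem.List.pyRange 100 141 1).map (fun i => i) := by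
    simp only [List.mem_map, PySem.List.mem_pyRange_one]
    rintro ⟨i, hi, rfl⟩
    omega
  simp only [checkToken, List.mem_cons, List.not_mem_nil, or_false, hr, false_and]
  repeat rw [if_neg (by omega)]

set_option maxRecDepth 4096 in
set_option maxHeartbeats 1000000 in
lemma checkToken_alt_error_of_out (state : Int) (h : state < 1 ∨ 140 < state) :
    checkToken_alt state = "Error" := by
  have hk : ∀ k ∈ pvTable.keys, 1 ≤ k ∧ k ≤ 140 := by decide
  unfold checkToken_alt
  apply PySem.Dict.getD_of_not_contains
  rw [PySem.Dict.contains_eq_decide_mem_keys]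
  simp only [decide_eq_false_iff_not]
  intro hm
  have := hk _ hm
  omega

set_option maxRecDepth 8192 in
set_option maxHeartbeats 2000000 in
lemma checkToken_eq_alt_of_in :
    ∀ s ∈ PySem.List.pyRange 1 141 1, checkToken s = checkToken_alt s := by decide

-- ===== VERDICT (by name: the statement is the Claim_ definition above) =====
theorem checkToken_spec : Claim_equal_checkToken := by
  intro state _
  unfold Spec_checkToken
  by_cases h : 1 ≤ state ∧ state ≤ 140
  · exact (checkToken_eq_alt_of_in state (by rw [PySem.List.mem_pyRange_one]; omega)).symm ▸ rfl
  · rw [checkToken_error_of_out state (by omega), checkToken_alt_error_of_out state (by omega)]
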